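-- pv_equiv track=rewrite | github.com/Unzzui/cmf-web-scraping | scripts/maintenance/enrich_cmf_companies.py | _normalize_match_key
-- ===== SOURCE A (Python) =====
-- import unicodedata
--
-- def _normalize_match_key(s: str) -> str:
--     if not s:
--         return ""
--     s = unicodedata.normalize('NFKD', s).encode('ascii', 'ignore').decode('ascii')
--     s = s.lower().replace('_', ' ')
--     # keep alnum as tokens, replace others by space
--     s = ''.join(ch if ch.isalnum() else ' ' for ch in s)
--     tokens = [t for t in s.split() if t]
--     # Merge consecutive single-letter tokens into acronyms (e.g., "c a p" -> "cap")
--     merged: list[str] = []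
--     i = 0
--     while i < len(tokens):
--         if len(tokens[i]) == 1:
--             acc = []
--             while i < len(tokens) and len(tokens[i]) == 1:
--                 acc.append(tokens[i])
--                 i += 1
--             if acc:
--                 merged.append(''.join(acc))
--         else:
--             merged.append(tokens[i])
--             i += 1
--     tokens = merged
--     # common corporate stopwords
--     stop = {
--         # Mantener SAC/SACI; sí remover SA/SPA/LTDA
--         'sa','spa','ltda','cia','companias','compania','sociedad','anonima','anonimo',
--         'grupo','holding','industria','industrias','corporacion','corp','company','co','the','de','del','la','el','los','las','y','e'
--     }
--     # Remove stopwords and legal-form single letters if any remained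
--     legal_single = {'s','a','d','p','e','i'}
--     tokens = [t for t in tokens if (t not in stop) and (len(t) > 1 or t not in legal_single)]
--     return ' '.join(tokens)
-- ===== SOURCE B (Python) =====
-- import unicodedata
--
-- _STOP = {
--     'sa','spa','ltda','cia','companias','compania','sociedad','anonima','anonimo',
--     'grupo','holding','industria','industrias','corporacion','corp','company','co','the','de','del','la','el','los','las','y','e'
-- }
-- _LEGAL_SINGLE = {'s','a','d','p','e','i'}
--
--
-- def _normalize_match_key(s: str) -> str:
--     if not s:
--         return ""
--     s = unicodedata.normalize('NFKD', s).encode('ascii', 'ignore').decode('ascii')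
--     # One pass over the characters: cut alnum tokens out of the stream and glue
--     # maximal runs of single-letter tokens together as they are produced.
--     merged: list[str] = []
--     cur = ''
--     run = False  # last element of `merged` is an open run of single letters
--     for ch in s.lower() + ' ':
--         if ch.isalnum():
--             cur += ch
--             continue
--         if cur:
--             if len(cur) == 1 and run:
--                 merged[-1] += cur
--             else:
--                 merged.append(cur)
--             run = len(cur) == 1
--             cur = ''
--     return ' '.join(t for t in merged
--                     if t not in _STOP and (len(t) > 1 or t not in _LEGAL_SINGLE))
-- ===== Notes on version B (the rewrite author's own statement) =====
-- stated objective: alternative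
-- what changed: A builds a masked copy of the string, splits it into a token list, and merges single-letter runs with an index plus nested while loop; B is a single character-level scan that cuts alnum tokens out of the stream and glues maximal single-letter runs into the last output token as they are produced, so the mask/join/split phases and the nested merge loop disappear.
import Mathlib
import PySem

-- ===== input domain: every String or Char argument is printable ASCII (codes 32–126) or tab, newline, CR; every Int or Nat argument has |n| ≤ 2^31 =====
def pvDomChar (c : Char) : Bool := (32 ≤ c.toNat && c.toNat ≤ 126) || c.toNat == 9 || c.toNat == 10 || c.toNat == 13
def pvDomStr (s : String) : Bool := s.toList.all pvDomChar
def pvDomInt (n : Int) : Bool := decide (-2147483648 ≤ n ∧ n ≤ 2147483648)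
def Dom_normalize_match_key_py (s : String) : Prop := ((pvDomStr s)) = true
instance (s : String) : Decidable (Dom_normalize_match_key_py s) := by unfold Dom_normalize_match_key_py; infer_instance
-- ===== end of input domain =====

-- B replaces A's four-phase mask/split/merge pipeline by a single character-level scan that cuts
-- tokens out of the stream and glues single-letter runs as they appear (objective: alternative).
-- The NFKD-normalize + ascii-encode/ignore step of both Pythons is the identity on the ASCII
-- domain Dom and is ported as such in both ports.

-- ===== PORT A =====

-- the corporate stopword set (identical literal in both Pythons)
def pvStop : List (List Char) :=
  (["sa","spa","ltda","cia","companias","compania","sociedad","anonima","anonimo",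
    "grupo","holding","industria","industrias","corporacion","corp","company","co",
    "the","de","del","la","el","los","las","y","e"]).map String.toList

def pvLegalSingle : List (List Char) := (["s","a","d","p","e","i"]).map String.toList

-- the final filter, '(t not in stop) and (len(t) > 1 or t not in legal_single)' (identical in both Pythons)
def pvKeep (t : List Char) : Bool :=
  !(pvStop.contains t) && (decide (1 < t.length) || !(pvLegalSingle.contains t))

def pvSingle (t : List Char) : Bool := t.length == 1

-- A's 'while i < len(tokens)' merge loop: the inner 'while' collecting the run of
-- single-letter tokens is the takeWhile/dropWhile pair, ''.join(acc) is Chars.join []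
def pvMergeA : List (List Char) → List (List Char)
  | [] => []
  | t :: rest =>
    if pvSingle t then
      PySem.Chars.join [] (t :: rest.takeWhile pvSingle) :: pvMergeA (rest.dropWhile pvSingle)
    else
      t :: pvMergeA rest
  termination_by l => l.length
  decreasing_by
  · have := List.length_dropWhile_le pvSingle rest; simp; omega
  · simp

def normalize_match_key_py (s : String) : String :=
  if s.toList = [] then ""
  else
    -- s.lower().replace('_', ' ')
    let cs := PySem.Chars.replace (PySem.Chars.lower s.toList) ['_'] [' ']
    -- ''.join(ch if ch.isalnum() else ' ' for ch in s)
    let masked := cs.map (fun ch => if PySem.Chars.isalnum ch then ch else ' ')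
    -- [t for t in s.split() if t]
    let tokens := (PySem.Chars.split₀ masked).filter (fun t => !t.isEmpty)
    let merged := pvMergeA tokens
    String.ofList (PySem.Chars.join [' '] (merged.filter pvKeep))

-- ===== PORT B =====

-- one step of B's scan; state = (merged reversed, current token, open single-letter run?)
def pvStepB (st : List (List Char) × List Char × Bool) (c : Char) :
    List (List Char) × List Char × Bool :=
  match st with
  | (mrev, cur, run) =>
    if PySem.Chars.isalnum c then (mrev, cur ++ [c], run)
    else if cur.isEmpty then (mrev, cur, run)
    else
      ((if pvSingle cur && run then
          (match mrev with | h :: m => (h ++ cur) :: m | [] => [cur])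
        else cur :: mrev),
       [], pvSingle cur)

def normalize_match_key_py_alt (s : String) : String :=
  if s.toList = [] then ""
  else
    -- for ch in s.lower() + ' ':  (merged is accumulated in reverse; merged[-1] += cur is the head)
    let st := ((PySem.Chars.lower s.toList) ++ [' ']).foldl pvStepB ([], [], false)
    let merged := st.1.reverse
    String.ofList (PySem.Chars.join [' '] (merged.filter pvKeep))

-- ===== PRECONDITION & SPEC =====
def Spec_normalize_match_key_py (s : String) (out : String) : Prop := out = normalize_match_key_py_alt s
instance (s : String) (out : String) : Decidable (Spec_normalize_match_key_py s out) := by unfold Spec_normalize_match_key_py; infer_instance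

-- ===== CLAIM (what is proved, stated in full; the proofs are below) =====
def Claim_equal_normalize_match_key_py : Prop := ∀ (s : String), Dom_normalize_match_key_py s → Spec_normalize_match_key_py s (normalize_match_key_py s)

-- ===== LEMMAS AND PROOFS =====

-- the masking function of A's pipeline
def pvMask (ch : Char) : Char := if PySem.Chars.isalnum ch then ch else ' '

-- forward tokenizer: the maximal alnum runs of ds, cur being the token under construction
def pvTokF : List Char → List Char → List (List Char)
  | [], cur => if cur.isEmpty then [] else [cur]
  | c :: ds, cur =>
    if PySem.Chars.isalnum c then pvTokF ds (cur ++ [c])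
    else if cur.isEmpty then pvTokF ds [] else cur :: pvTokF ds []

-- token-level view of B's scan
def pvFlush (mrev : List (List Char)) (run : Bool) (t : List Char) :
    List (List Char) × Bool :=
  ((if pvSingle t && run then
      (match mrev with | h :: m => (h ++ t) :: m | [] => [t])
    else t :: mrev), pvSingle t)

def pvG : List (List Char) → List (List Char) × Bool → List (List Char)
  | [], st => st.1
  | t :: ts, (mrev, run) => pvG ts (pvFlush mrev run t)

-- A's merge with an open accumulated run h
def pvMergeAcc (h : List Char) (ts : List (List Char)) : List (List Char) :=
  (h ++ (ts.takeWhile pvSingle).flatten) :: pvMergeA (ts.dropWhile pvSingle)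

theorem pv_join_nil (parts : List (List Char)) : PySem.Chars.join [] parts = parts.flatten := by
  simp only [PySem.Chars.join, List.intercalate]
  induction parts with
  | nil => rfl
  | cons x xs ih => cases xs <;> simp_all [List.intersperse]

theorem pv_alnum_not_space (c : Char) (h : PySem.Chars.isalnum c = true) :
    PySem.Chars.isspace c = false := by
  simp only [PySem.Chars.isalnum, PySem.Chars.isalpha, PySem.Chars.isdigit, PySem.Chars.isupper,
    PySem.Chars.islower, PySem.Chars.isspace, Bool.or_eq_true, Bool.and_eq_true, decide_eq_true_eq,
    Char.le_def, UInt32.le_iff_toNat_le, Char.toNat,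
    show ('A'.val.toNat) = 65 from rfl, show ('Z'.val.toNat) = 90 from rfl,
    show ('a'.val.toNat) = 97 from rfl, show ('z'.val.toNat) = 122 from rfl,
    show ('0'.val.toNat) = 48 from rfl, show ('9'.val.toNat) = 57 from rfl] at *
  simp only [Bool.or_eq_false_iff, Bool.and_eq_false_iff, decide_eq_false_iff_not]
  omega

theorem pv_mask_not_alnum (c : Char) (h : PySem.Chars.isalnum c = false) : pvMask c = ' ' := by
  simp [pvMask, h]

theorem pv_mask_alnum (c : Char) (h : PySem.Chars.isalnum c = true) : pvMask c = c := by
  simp [pvMask, h]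

-- the replace('_', ' ') step is invisible through the mask
theorem pv_replace_go_mask (fuel : Nat) (l acc : List Char) (hf : l.length ≤ fuel) :
    (PySem.Chars.replace.go ['_'] [' '] fuel l acc).map pvMask = (acc.reverse ++ l).map pvMask := by
  induction fuel generalizing l acc with
  | zero => simp [PySem.Chars.replace.go]
  | succ fuel ih =>
    cases l with
    | nil => simp [PySem.Chars.replace.go]
    | cons c t =>
      simp only [PySem.Chars.replace.go]
      by_cases hc : c = '_'
      · subst hc
        rw [if_pos (by simp [List.isPrefixOf])]
        rw [ih _ _ (by simpa using Nat.le_of_succ_le_succ hf)]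
        simp [pv_mask_not_alnum ' ' (by decide), pv_mask_not_alnum '_' (by decide)]
      · rw [if_neg (by simp [List.isPrefixOf]; exact fun h => hc h.symm)]
        rw [ih _ _ (by simpa using Nat.le_of_succ_le_succ hf)]
        simp

theorem pv_replace_mask (l : List Char) :
    (PySem.Chars.replace l ['_'] [' ']).map pvMask = l.map pvMask := by
  simp only [PySem.Chars.replace]
  rw [if_neg (by decide)]
  simpa using pv_replace_go_mask l.length l []

-- split() of the masked list is the forward alnum-run tokenizer
theorem pv_split_go_tok (ds : List Char) : ∀ (cur : List Char) (acc : List (List Char)),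
    PySem.Chars.split₀.go (ds.map pvMask) cur acc = acc.reverse ++ pvTokF ds cur.reverse := by
  induction ds with
  | nil =>
    intro cur acc
    simp only [List.map_nil, PySem.Chars.split₀.go, pvTokF]
    by_cases h : cur.isEmpty <;> simp_all [List.isEmpty_iff]
  | cons c ds ih =>
    intro cur acc
    by_cases h : PySem.Chars.isalnum c
    · simp only [List.map_cons, PySem.Chars.split₀.go, pv_mask_alnum c h,
        pv_alnum_not_space c h, pvTokF, h]
      rw [if_neg (by simp), ih (c :: cur) acc]
      simp
    · simp only [List.map_cons, PySem.Chars.split₀.go,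
        pv_mask_not_alnum c (by simpa using h), pvTokF, h]
      rw [if_pos (by decide)]
      by_cases hcur : cur.isEmpty
      · rw [if_pos hcur, ih [] acc]
        simp_all [List.isEmpty_iff]
      · rw [if_neg hcur, ih [] (cur.reverse :: acc)]
        simp_all [List.isEmpty_iff]

theorem pv_split_tok (ds : List Char) :
    PySem.Chars.split₀ (ds.map pvMask) = pvTokF ds [] := by
  simpa using pv_split_go_tok ds [] []

-- the tokenizer never produces the empty token
theorem pv_tok_ne_nil (ds : List Char) : ∀ (cur : List Char), ∀ t ∈ pvTokF ds cur, t ≠ [] := by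
  induction ds with
  | nil =>
    intro cur t ht
    simp only [pvTokF] at ht
    by_cases h : cur.isEmpty <;> simp_all [List.isEmpty_iff]
  | cons c ds ih =>
    intro cur t ht
    simp only [pvTokF] at ht
    by_cases h : PySem.Chars.isalnum c
    · simp only [if_pos h] at ht; exact ih _ t ht
    · simp only [if_neg h] at ht
      by_cases hcur : cur.isEmpty
      · rw [if_pos hcur] at ht; exact ih _ t ht
      · rw [if_neg hcur] at ht
        rcases List.mem_cons.mp ht with rfl | ht
        · simp_all [List.isEmpty_iff]
        · exact ih _ t ht

-- B's character scan computes the token-level fold pvG over the tokenization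
theorem pv_fold_tok (ds : List Char) : ∀ (mrev : List (List Char)) (cur : List Char) (run : Bool),
    ((ds ++ [' ']).foldl pvStepB (mrev, cur, run)).1 = pvG (pvTokF ds cur) (mrev, run) := by
  induction ds with
  | nil =>
    intro mrev cur run
    simp only [List.nil_append, List.foldl_cons, List.foldl_nil, pvStepB, pvTokF]
    rw [if_neg (by decide)]
    by_cases h : cur.isEmpty
    · simp [h, pvG]
    · simp [h, pvG, pvFlush]
  | cons c ds ih =>
    intro mrev cur run
    simp only [List.cons_append, List.foldl_cons, pvStepB, pvTokF]
    by_cases h : PySem.Chars.isalnum c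
    · simp only [if_pos h]; exact ih mrev (cur ++ [c]) run
    · simp only [if_neg h]
      by_cases hcur : cur.isEmpty
      · simp only [if_pos hcur]; exact ih mrev cur run |>.trans (by simp_all [List.isEmpty_iff])
      · simp only [if_neg hcur]
        rw [ih _ [] _]
        simp [pvG, pvFlush]

-- the token-level fold is A's merge (joint statement for the closed and the open-run state)
theorem pv_G_merge (ts : List (List Char)) :
    (∀ mrev, pvG ts (mrev, false) = (pvMergeA ts).reverse ++ mrev) ∧
    (∀ h mrev, pvG ts (h :: mrev, true) = (pvMergeAcc h ts).reverse ++ mrev) := by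
  induction ts with
  | nil =>
    constructor
    · intro mrev; simp [pvG, pvMergeA]
    · intro h mrev; simp [pvG, pvMergeAcc, pvMergeA]
  | cons t ts ih =>
    obtain ⟨ihf, iht⟩ := ih
    constructor
    · intro mrev
      simp only [pvG, pvFlush, Bool.and_false]
      rw [if_neg Bool.false_ne_true]
      by_cases hs : pvSingle t
      · rw [hs, iht t mrev]
        simp [pvMergeA, hs, pvMergeAcc, pv_join_nil]
      · rw [Bool.not_eq_true] at hs
        rw [hs, ihf (t :: mrev)]
        simp [pvMergeA, hs]
    · intro h mrev
      simp only [pvG, pvFlush]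
      by_cases hs : pvSingle t
      · rw [hs, if_pos (by simp)]
        rw [iht (h ++ t) mrev]
        simp [pvMergeAcc, hs, List.append_assoc]
      · rw [Bool.not_eq_true] at hs
        rw [hs, if_neg (by simp), ihf (t :: h :: mrev)]
        simp [pvMergeAcc, pvMergeA, hs, List.takeWhile, List.dropWhile]

-- ===== VERDICT (by name: the statement is the Claim_ definition above) =====
theorem normalize_match_key_py_spec : Claim_equal_normalize_match_key_py := by
  intro s _
  unfold Spec_normalize_match_key_py normalize_match_key_py normalize_match_key_py_alt
  by_cases hnil : s.toList = []
  · simp [hnil]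
  · rw [if_neg hnil, if_neg hnil]
    dsimp only
    set ds := PySem.Chars.lower s.toList with hds
    have h1 : (PySem.Chars.replace ds ['_'] [' ']).map
        (fun ch => if PySem.Chars.isalnum ch then ch else ' ') = ds.map pvMask := by
      simpa [pvMask] using pv_replace_mask ds
    rw [h1, pv_split_tok ds]
    have h2 : (pvTokF ds []).filter (fun t => !t.isEmpty) = pvTokF ds [] :=
      List.filter_eq_self.mpr (fun t ht => by
        simpa [List.isEmpty_iff] using pv_tok_ne_nil ds [] t ht)
    rw [h2]
    have h3 : (((ds ++ [' ']).foldl pvStepB ([], [], false)).1).reverse = pvMergeA (pvTokF ds []) := by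
      rw [pv_fold_tok ds [] [] false, (pv_G_merge (pvTokF ds [])).1 []]
      simp
    rw [h3]
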